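-- pv_equiv track=rewrite | github.com/hmghaly/word_align | cat_utils.py | get_first_freq_dict
-- ===== SOURCE A (Python) =====
-- from itertools import groupby
--
-- def get_first_freq_dict(freq_dict):
--   list_with_first=[]
--   for a,b in freq_dict.items():
--     first=a.split(" ")[0]
--     list_with_first.append((first,(a,b)))
--   list_with_first.sort()
--   grouped0=[(key,[v[1] for v in list(group)]) for key,group in groupby(list_with_first,lambda x:x[0])]
--   return dict(iter(grouped0))
-- ===== SOURCE B (Python) =====
-- def get_first_freq_dict(freq_dict):
--   table = {}
--   for a, b in freq_dict.items():
--     table.setdefault(a.split(" ")[0], []).append((a, b))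
--   return {k: sorted(table[k]) for k in sorted(table)}
-- ===== Notes on version B (the rewrite author's own statement) =====
-- stated objective: alternative
-- what changed: Replaces the global sort of (first, (key, value)) tuples followed by itertools.groupby with a single dict pass that buckets items by first word, then emits the sorted bucket keys each with its bucket sorted by (key, value).
import Mathlib
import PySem

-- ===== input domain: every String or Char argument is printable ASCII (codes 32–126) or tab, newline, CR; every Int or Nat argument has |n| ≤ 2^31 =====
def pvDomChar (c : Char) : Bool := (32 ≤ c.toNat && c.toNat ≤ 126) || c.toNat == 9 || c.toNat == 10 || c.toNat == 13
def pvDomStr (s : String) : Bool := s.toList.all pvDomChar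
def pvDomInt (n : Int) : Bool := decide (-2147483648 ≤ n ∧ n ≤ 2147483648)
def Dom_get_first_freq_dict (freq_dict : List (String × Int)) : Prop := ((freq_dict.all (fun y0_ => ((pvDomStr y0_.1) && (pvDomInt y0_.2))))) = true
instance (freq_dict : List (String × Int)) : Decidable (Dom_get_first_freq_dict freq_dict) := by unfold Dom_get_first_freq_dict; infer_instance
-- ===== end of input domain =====

-- B groups the pairs into per-first-word buckets in one dict pass and emits sorted keys with
-- per-bucket sorts, instead of A's global sort + itertools.groupby (objective: alternative; same exact result).
-- The 'freq_dict' argument is a Python dict: the association list stands for dict(freq_dict)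
-- (PySem.Dict.ofList), and '.items()' in both sources is its items list.

-- shared helper: a.split(" ")[0].  split? with the non-empty separator " " is always some,
-- and Python's split always returns a non-empty list, so index 0 is the head.
def pyFirst (a : String) : String := ((PySem.Str.split? a " ").getD []).headD ""

-- ===== PORT A =====
-- Python compares the tuples (first, (a, b)) lexicographically; aKey packages that order
-- as a key into the order-isomorphic Lex product so that list.sort() is PySem.List.sorted.
def aKey (x : String × (String × Int)) : Lex (String × Lex (String × Int)) := toLex (x.1, toLex x.2)

-- itertools.groupby over the sorted list together with the comprehension
-- [(key, [v[1] for v in group]) …]: maximal runs of equal first components.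
def groupRun : List (String × (String × Int)) → List (String × List (String × Int))
  | [] => []
  | (k, v) :: t =>
    match groupRun t with
    | [] => [(k, [v])]
    | (k', vs) :: rest =>
      if k = k' then (k, v :: vs) :: rest else (k, [v]) :: (k', vs) :: rest

def get_first_freq_dict (freq_dict : List (String × Int)) : List (String × List (String × Int)) :=
  let items := (PySem.Dict.ofList freq_dict).items
  let list_with_first := items.foldl (fun acc p => acc ++ [(pyFirst p.1, (p.1, p.2))]) []
  let sortedL := PySem.List.sorted list_with_first aKey false      -- list_with_first.sort()
  let grouped0 := groupRun sortedL
  (PySem.Dict.ofList grouped0).items                               -- dict(iter(grouped0))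

-- ===== PORT B =====
def get_first_freq_dict_alt (freq_dict : List (String × Int)) : List (String × List (String × Int)) :=
  let items := (PySem.Dict.ofList freq_dict).items
  -- table.setdefault(a.split(" ")[0], []).append((a, b))  ==  d[k] = d.get(k, []) ++ [(a, b)]
  let table := items.foldl
    (fun d p => d.modify (pyFirst p.1) [] (fun l => l ++ [(p.1, p.2)])) PySem.Dict.empty
  let ks := PySem.List.sorted table.keys (fun k => k) false        -- sorted(table)
  (PySem.Dict.ofList (ks.map (fun k =>
    (k, PySem.List.sorted2 (table.getD k []) (fun p => p.1) (fun p => p.2) false)))).items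

-- ===== PRECONDITION & SPEC =====
def Spec_get_first_freq_dict (freq_dict : List (String × Int)) (out : List (String × List (String × Int))) : Prop := out = get_first_freq_dict_alt freq_dict
instance (freq_dict : List (String × Int)) (out : List (String × List (String × Int))) : Decidable (Spec_get_first_freq_dict freq_dict out) := by unfold Spec_get_first_freq_dict; infer_instance

-- ===== CLAIM (what is proved, stated in full; the proofs are below) =====
def Claim_equal_get_first_freq_dict : Prop := ∀ (freq_dict : List (String × Int)), Dom_get_first_freq_dict freq_dict → Spec_get_first_freq_dict freq_dict (get_first_freq_dict freq_dict)

-- ===== LEMMAS AND PROOFS =====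

-- sorted with a Python tuple key is sorted with the corresponding Lex key (primary key linear)
lemma sorted2_eq_sorted_toLex {α κ₁ κ₂ : Type} [LinearOrder κ₁] [LinearOrder κ₂]
    (xs : List α) (k1 : α → κ₁) (k2 : α → κ₂) :
    PySem.List.sorted2 xs k1 k2 false = PySem.List.sorted xs (fun x => toLex (k1 x, k2 x)) false := by
  have hb : (fun a b => decide (k1 a < k1 b) || (!decide (k1 b < k1 a) && decide (k2 a < k2 b)))
      = (fun a b : α => decide ((fun x => toLex (k1 x, k2 x)) a < (fun x => toLex (k1 x, k2 x)) b)) := by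
    funext a b
    simp only [Prod.Lex.toLex_lt_toLex]
    rcases lt_trichotomy (k1 a) (k1 b) with h | h | h
    · simp [h, not_lt_of_gt h]
    · simp [h]
    · simp only [not_lt_of_gt h, h, decide_false, Bool.false_or, decide_true, Bool.not_true,
        Bool.false_and]
      simp only [Bool.false_eq, decide_eq_false_iff_not, not_or, not_and]
      exact ⟨fun x => x, fun he => absurd h (by simp [he])⟩
  simp only [PySem.List.sorted2, PySem.List.sorted]
  rw [hb]
  simp

lemma map_fst_key {β : Type} (K : List String) (F : String → β) :
    (K.map (fun k => (k, F k))).map (·.1) = K := by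
  rw [List.map_map]
  exact List.map_id K

-- dict(pairs) with pairwise-distinct keys has exactly those pairs as items
lemma dict_items_of_nodup {ν : Type} (l : List (String × ν)) (h : (l.map (·.1)).Nodup) :
    (PySem.Dict.ofList l).items = l := by
  have := PySem.Dict.items_foldl_insert_fresh l (fun p => p.1) (fun p => p.2)
    (PySem.Dict.empty)
    (fun a _ => PySem.Dict.contains_empty _) h
  simpa [PySem.Dict.ofList, PySem.Dict.update, PySem.Dict.empty] using this

-- set(m) of a ≤-sorted list is <-sorted
lemma ofList_pairwise_lt {α : Type} [LinearOrder α] [BEq α] [LawfulBEq α]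
    (m : List α) (h : m.Pairwise (· ≤ ·)) : (PySem.Set.ofList m).Pairwise (· < ·) := by
  induction m with
  | nil => simp [PySem.Set.ofList]
  | cons x t ih =>
    rw [PySem.Set.ofList_cons]
    rcases List.pairwise_cons.mp h with ⟨hx, ht⟩
    refine List.Pairwise.cons ?_ ?_
    · intro y hy
      rcases (PySem.Set.mem_discard _ _ _).mp hy with ⟨hy1, hy2⟩
      exact lt_of_le_of_ne (hx y ((PySem.Set.mem_ofList t y).mp hy1)) (Ne.symm hy2)
    · exact List.Pairwise.filter _ (ih ht)

lemma groupRun_cons (k : String) (v : String × Int) (t : List (String × (String × Int))) :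
    groupRun ((k, v) :: t) = match groupRun t with
      | [] => [(k, [v])]
      | (k', vs) :: rest =>
        if k = k' then (k, v :: vs) :: rest else (k, [v]) :: (k', vs) :: rest := rfl

lemma groupRun_cons₂ {t : List (String × (String × Int))} {k' : String}
    {vs : List (String × Int)} {rest : List (String × List (String × Int))}
    (k : String) (v : String × Int) (hg : groupRun t = (k', vs) :: rest) :
    groupRun ((k, v) :: t)
      = if k = k' then (k, v :: vs) :: rest else (k, [v]) :: (k', vs) :: rest := by
  rw [groupRun_cons, hg]

-- groupby over a list sorted by first component: one group per distinct key, in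
-- first-appearance order, each carrying the second components of its members
lemma groupRun_eq (S : List (String × (String × Int)))
    (h : S.Pairwise (fun x y => x.1 ≤ y.1)) :
    groupRun S = (PySem.Set.ofList (S.map (·.1))).map
      (fun k => (k, (S.filter (fun x => x.1 == k)).map (·.2))) := by
  induction S with
  | nil => simp [groupRun, PySem.Set.ofList]
  | cons x t ih =>
    obtain ⟨k, v⟩ := x
    rcases List.pairwise_cons.mp h with ⟨hk, ht⟩
    have IH := ih ht
    cases t with
    | nil => simp [groupRun, PySem.Set.ofList, PySem.Set.add]
    | cons y t' =>
      obtain ⟨k2, v2⟩ := y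
      rcases List.pairwise_cons.mp ht with ⟨hk2, ht'⟩
      have hofl : PySem.Set.ofList (((k2, v2) :: t').map (·.1))
          = k2 :: (PySem.Set.ofList (t'.map (·.1))).discard k2 := by
        simp [PySem.Set.ofList_cons]
      have hT : groupRun ((k2, v2) :: t')
          = (k2, (((k2, v2) :: t').filter (fun x => x.1 == k2)).map (·.2))
            :: ((PySem.Set.ofList (t'.map (·.1))).discard k2).map
              (fun c => (c, (((k2, v2) :: t').filter (fun x => x.1 == c)).map (·.2))) := by
        rw [IH, hofl]; simp
      rw [groupRun_cons₂ k v hT]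
      by_cases hkk : k = k2
      · subst hkk
        rw [if_pos rfl]
        rw [List.map_cons, PySem.Set.ofList_cons, hofl]
        have hdd : PySem.Set.discard (k :: (PySem.Set.ofList (t'.map (·.1))).discard k) k
            = (PySem.Set.ofList (t'.map (·.1))).discard k := by
          show List.filter _ _ = _
          simp [PySem.Set.discard, List.filter_filter]
        rw [hdd]
        rw [List.map_cons]
        refine congrArg₂ List.cons ?_ ?_
        · simp
        · apply List.map_congr_left
          intro c hc
          rcases (PySem.Set.mem_discard _ _ _).mp hc with ⟨_, hne⟩
          have heq : ((k, v) :: (k, v2) :: t').filter (fun x => x.1 == c)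
              = ((k, v2) :: t').filter (fun x => x.1 == c) := by
            rw [List.filter_cons_of_neg]
            simp [Ne.symm hne]
          rw [heq]
      · simp only [if_neg hkk]
        have hklt : ∀ c ∈ ((k2, v2) :: t').map (fun x => x.1), k < c := by
          intro c hc
          rcases List.mem_cons.mp hc with hc | hc
          · exact hc ▸ lt_of_le_of_ne (hk (k2, v2) (List.mem_cons_self)) hkk
          · rcases List.mem_map.mp hc with ⟨z, hz, rfl⟩
            exact lt_of_lt_of_le (lt_of_le_of_ne (hk (k2, v2) (List.mem_cons_self)) hkk)
              (hk2 z hz)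
        rw [List.map_cons, PySem.Set.ofList_cons]
        have hnd : PySem.Set.discard (PySem.Set.ofList (((k2, v2) :: t').map (·.1))) k
            = PySem.Set.ofList (((k2, v2) :: t').map (·.1)) := by
          show List.filter _ _ = _
          apply List.filter_eq_self.mpr
          intro a ha
          have := hklt a ((PySem.Set.mem_ofList _ _).mp ha)
          simp
          exact ne_of_gt this
        rw [hnd, List.map_cons]
        refine congrArg₂ List.cons ?_ ?_
        · have h1 : ((k, v) :: (k2, v2) :: t').filter (fun x => x.1 == k) = [(k, v)] := by
            rw [List.filter_cons_of_pos (by simp)]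
            congr 1
            apply List.filter_eq_nil_iff.mpr
            intro z hz
            have := hklt z.1 (List.mem_map.mpr ⟨z, hz, rfl⟩)
            simp only [beq_iff_eq]
            exact ne_of_gt this
          simp [h1]
        · have hmc : (PySem.Set.ofList (((k2, v2) :: t').map (·.1))).map
              (fun c => (c, (((k, v) :: (k2, v2) :: t').filter (fun x => x.1 == c)).map (·.2)))
              = (PySem.Set.ofList (((k2, v2) :: t').map (·.1))).map
              (fun c => (c, (((k2, v2) :: t').filter (fun x => x.1 == c)).map (·.2))) := by
            apply List.map_congr_left
            intro c hc
            have := hklt c ((PySem.Set.mem_ofList _ _).mp hc)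
            rw [List.filter_cons_of_neg (by simp only [beq_iff_eq]; exact ne_of_lt this)]
          rw [hmc, ← IH, hT]

lemma ports_eq (f : List (String × Int)) :
    get_first_freq_dict f = get_first_freq_dict_alt f := by
  classical
  set L := (PySem.Dict.ofList f).items with hLdef
  have hnodupL : (L.map (·.1)).Nodup := PySem.Dict.nodup_keys_ofList f
  set g : (String × Int) → String × (String × Int) := fun p => (pyFirst p.1, (p.1, p.2)) with hg
  set S := PySem.List.sorted (L.map g) aKey false with hS
  have hSperm : S.Perm (L.map g) := PySem.List.sorted_perm _ _ _
  have hSpair : S.Pairwise (fun a b => aKey a ≤ aKey b) := PySem.List.sorted_pairwise _ _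
  have hfst : S.Pairwise (fun x y => x.1 ≤ y.1) := by
    refine hSpair.imp ?_
    intro a b hab
    rcases Prod.Lex.toLex_le_toLex.mp hab with h | ⟨h, _⟩
    · exact le_of_lt h
    · exact le_of_eq h
  have hsnd_nodup : (S.map (fun x => x.2.1)).Nodup := by
    have h1 : ((L.map g).map (fun x => x.2.1)) = L.map (·.1) := by
      simp [hg, List.map_map]
    have : (S.map (fun x => x.2.1)).Perm (L.map (·.1)) := h1 ▸ (hSperm.map _)
    exact this.nodup_iff.mpr hnodupL
  have hkey : ∀ k : String,
      PySem.List.sorted2 (((L.map g).filter (fun q => q.1 == k)).map (·.2))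
        (fun p => p.1) (fun p => p.2) false
      = (S.filter (fun x => x.1 == k)).map (·.2) := by
    intro k
    rw [sorted2_eq_sorted_toLex]
    apply PySem.List.sorted_eq_of_perm_of_pairwise_lt
    · exact (hSperm.filter _).map _
    · have hne : (S.filter (fun x => x.1 == k)).Pairwise (fun x y => x.2.1 ≠ y.2.1) :=
        List.pairwise_map.mp (hsnd_nodup.sublist ((List.filter_sublist (l := S)).map _))
      have hle : (S.filter (fun x => x.1 == k)).Pairwise (fun x y => aKey x ≤ aKey y) :=
        hSpair.filter _
      have hmem : ∀ x ∈ S.filter (fun x => x.1 == k), x.1 = k := by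
        intro x hx
        rcases List.mem_filter.mp hx with ⟨_, hp⟩
        exact beq_iff_eq.mp hp
      have hlt : (S.filter (fun x => x.1 == k)).Pairwise
          (fun x y => toLex x.2 < toLex y.2) := by
        refine List.Pairwise.imp_of_mem ?_ (hle.and hne)
        intro a b ha hb hab
        rcases hab with ⟨hab1, hab2⟩
        have h1 : a.1 = b.1 := (hmem a ha).trans (hmem b hb).symm
        rcases Prod.Lex.toLex_le_toLex.mp hab1 with h | ⟨_, h⟩
        · exact absurd (h1 ▸ h) (lt_irrefl _)
        · refine lt_of_le_of_ne h ?_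
          intro hcon
          exact hab2 (congrArg (fun z => (ofLex z).1) hcon)
      rw [List.pairwise_map]
      exact hlt
  -- A side
  have hA : get_first_freq_dict f = (PySem.Set.ofList (S.map (·.1))).map
      (fun k => (k, (S.filter (fun x => x.1 == k)).map (·.2))) := by
    simp only [get_first_freq_dict]
    rw [← hLdef, PySem.List.foldl_append_singleton_eq_map, List.nil_append, ← hg, ← hS,
      groupRun_eq S hfst]
    apply dict_items_of_nodup
    rw [map_fst_key]
    exact PySem.Set.nodup_ofList _
  -- B side
  have htab : (L.map g).foldl (fun d q => d.modify q.1 [] (fun l => l ++ [q.2])) PySem.Dict.empty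
      = L.foldl (fun d p => d.modify (pyFirst p.1) [] (fun l => l ++ [(p.1, p.2)])) PySem.Dict.empty := by
    rw [List.foldl_map]
  have hkeys : ((L.map g).foldl (fun d q => d.modify q.1 [] (fun l => l ++ [q.2]))
      PySem.Dict.empty).keys = PySem.Set.ofList ((L.map g).map (·.1)) := by
    rw [PySem.Dict.keys_foldl_modify_key (L.map g) (fun q => q.1) [] (fun _ q => fun l => l ++ [q.2])]
    simp [PySem.Set.update_nil_left]
  have hks : PySem.List.sorted (PySem.Set.ofList ((L.map g).map (·.1))) (fun k => k) false
      = PySem.Set.ofList (S.map (·.1)) := by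
    apply PySem.List.sorted_eq_of_perm_of_pairwise_lt
    · apply (List.perm_ext_iff_of_nodup (PySem.Set.nodup_ofList _) (PySem.Set.nodup_ofList _)).mpr
      intro a
      rw [PySem.Set.mem_ofList, PySem.Set.mem_ofList]
      exact (hSperm.map (·.1)).mem_iff
    · exact ofList_pairwise_lt _ (List.pairwise_map.mpr hfst)
  have hB : get_first_freq_dict_alt f = (PySem.Set.ofList (S.map (·.1))).map
      (fun k => (k, (S.filter (fun x => x.1 == k)).map (·.2))) := by
    simp only [get_first_freq_dict_alt]
    rw [← hLdef, ← htab, hkeys, hks]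
    simp only [show (∀ k, ((L.map g).foldl (fun d q => d.modify q.1 [] (fun l => l ++ [q.2]))
        PySem.Dict.empty).getD k [] = ((L.map g).filter (fun q => q.1 == k)).map (·.2)) from
      fun k => by simpa using PySem.Dict.getD_foldl_modify_append (L.map g) PySem.Dict.empty k]
    simp only [hkey]
    apply dict_items_of_nodup
    rw [map_fst_key]
    exact PySem.Set.nodup_ofList _
  rw [hA, hB]

-- ===== VERDICT (by name: the statement is the Claim_ definition above) =====
theorem get_first_freq_dict_spec : Claim_equal_get_first_freq_dict := by
  intro f _
  exact ports_eq f
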